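-- pv_equiv track=rewrite | github.com/AnubhabDebnathAgnikul/CODEC | code_main.py | FS_decoder
-- ===== SOURCE A (Python) =====
-- def FS_decoder(seq,block_size):
--     zeros = 0
--     ones = 0
--     dec_seq = []
--     for i in range(len(seq)):
--         if (seq[i] == 0) or (seq[i] == '0'):
--             zeros+=1
--         else:
--             ones+=1
--             dec_seq.append(zeros)    # one FS sample
--             zeros = 0
--             if ones == block_size:  # finished FS code for J(block size) samples
--                 return dec_seq
-- ===== SOURCE B (Python) =====
-- def FS_decoder(seq, block_size):
--     # Pass 1: indices of the non-zero ("one") samples, truncated after block_size hits.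
--     idxs = []
--     for i, x in enumerate(seq):
--         if not (x == 0 or x == '0'):
--             idxs.append(i)
--             if len(idxs) == block_size:
--                 break
--     # Pass 2: gaps between consecutive one-indices are the decoded samples.
--     if block_size >= 1 and len(idxs) == block_size:
--         prev = -1
--         gaps = []
--         for j in idxs:
--             gaps.append(j - prev - 1)
--             prev = j
--         return gaps
--     return None
-- ===== Notes on version B (the rewrite author's own statement) =====
-- stated objective: alternative
-- what changed: Replaces A's single stateful loop (zero counter reset at each one, early return) by two differently-shaped passes: collect the indices of the non-zero elements (truncated at block_size), then emit the gaps between consecutive one-indices; None when block_size < 1 or fewer than block_size ones.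
import Mathlib
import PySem

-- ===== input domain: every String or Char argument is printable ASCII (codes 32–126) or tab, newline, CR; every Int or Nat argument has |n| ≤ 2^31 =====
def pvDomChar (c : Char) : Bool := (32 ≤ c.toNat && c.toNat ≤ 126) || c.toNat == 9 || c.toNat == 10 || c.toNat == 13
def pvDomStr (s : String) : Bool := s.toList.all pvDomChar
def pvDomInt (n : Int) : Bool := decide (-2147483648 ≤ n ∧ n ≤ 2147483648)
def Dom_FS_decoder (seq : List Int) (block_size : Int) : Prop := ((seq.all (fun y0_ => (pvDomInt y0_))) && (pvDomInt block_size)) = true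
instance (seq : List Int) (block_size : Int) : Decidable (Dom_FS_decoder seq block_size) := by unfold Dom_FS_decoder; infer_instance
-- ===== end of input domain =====

-- B replaces A's single stateful counting loop by two passes (collect one-indices, then emit index gaps); alternative decomposition, same cost.

-- ===== PORT A =====
-- A's loop over seq with state (zeros, ones, dec_seq) and an early return; falls off the end → none.
def FS_go (rest : List Int) (zeros ones : Int) (dec_seq : List Int) (block_size : Int) : Option (List Int) :=
  match rest with
  | [] => none
  | x :: xs =>
    if x == 0 then FS_go xs (zeros + 1) ones dec_seq block_size
    else
      let ones' := ones + 1
      let dec' := dec_seq ++ [zeros]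
      if ones' == block_size then some dec'
      else FS_go xs 0 ones' dec' block_size

def FS_decoder (seq : List Int) (block_size : Int) : Option (List Int) :=
  FS_go seq 0 0 [] block_size

-- ===== PORT B =====
-- pass 1: indices of non-zero elements, stopping once block_size of them are collected
def FS_collectIdx (rest : List Int) (i : Int) (block_size : Int) (acc : List Int) : List Int :=
  match rest with
  | [] => acc
  | x :: xs =>
    if x == 0 then FS_collectIdx xs (i + 1) block_size acc
    else
      let acc' := acc ++ [i]
      if (acc'.length : Int) == block_size then acc'
      else FS_collectIdx xs (i + 1) block_size acc'

-- pass 2: gaps between consecutive one-indices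
def FS_gaps (idxs : List Int) (prev : Int) : List Int :=
  match idxs with
  | [] => []
  | j :: js => (j - prev - 1) :: FS_gaps js j

def FS_decoder_alt (seq : List Int) (block_size : Int) : Option (List Int) :=
  let idxs := FS_collectIdx seq 0 block_size []
  if 1 ≤ block_size ∧ (idxs.length : Int) = block_size then some (FS_gaps idxs (-1)) else none

-- ===== PRECONDITION & SPEC =====
def Spec_FS_decoder (seq : List Int) (block_size : Int) (out : Option (List Int)) : Prop := out = FS_decoder_alt seq block_size
instance (seq : List Int) (block_size : Int) (out : Option (List Int)) : Decidable (Spec_FS_decoder seq block_size out) := by unfold Spec_FS_decoder; infer_instance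

-- ===== CLAIM (what is proved, stated in full; the proofs are below) =====
def Claim_equal_FS_decoder : Prop := ∀ (seq : List Int) (block_size : Int), Dom_FS_decoder seq block_size → Spec_FS_decoder seq block_size (FS_decoder seq block_size)

-- ===== LEMMAS AND PROOFS =====

-- proof helper: last element with default (matches List.getLastD semantics)
def FS_lastD : List Int → Int → Int
  | [], d => d
  | a :: as, _ => FS_lastD as a

theorem FS_gaps_append (acc : List Int) (prev j : Int) :
    FS_gaps (acc ++ [j]) prev = FS_gaps acc prev ++ [j - FS_lastD acc prev - 1] := by
  induction acc generalizing prev with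
  | nil => simp [FS_gaps, FS_lastD]
  | cons a as ih => simp [FS_gaps, FS_lastD, ih]

theorem FS_lastD_append (acc : List Int) (j d : Int) :
    FS_lastD (acc ++ [j]) d = j := by
  induction acc generalizing d with
  | nil => rfl
  | cons a as ih => simpa [FS_lastD] using ih a

theorem FS_main (rest : List Int) (i : Int) (acc : List Int) (block_size : Int)
    (h : acc = [] ∨ (acc.length : Int) ≠ block_size) :
    FS_go rest (i - FS_lastD acc (-1) - 1) acc.length (FS_gaps acc (-1)) block_size
      = (let idxs := FS_collectIdx rest i block_size acc;
         if 1 ≤ block_size ∧ (idxs.length : Int) = block_size then some (FS_gaps idxs (-1)) else none) := by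
  induction rest generalizing i acc with
  | nil =>
    simp only [FS_go, FS_collectIdx]
    rcases h with h | h
    · subst h
      rw [if_neg]
      rintro ⟨h1, h2⟩
      simp only [List.length_nil, Nat.cast_zero] at h2
      omega
    · rw [if_neg]; rintro ⟨_, h2⟩; exact h h2
  | cons x xs ih =>
    simp only [FS_go, FS_collectIdx, beq_iff_eq]
    by_cases hx : x = 0
    · rw [if_pos hx, if_pos hx]
      have harith : i - FS_lastD acc (-1) - 1 + 1 = (i + 1) - FS_lastD acc (-1) - 1 := by ring
      rw [harith]
      simpa only [FS_collectIdx] using ih (i + 1) acc h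
    · rw [if_neg hx, if_neg hx]
      by_cases hdone : (acc.length : Int) + 1 = block_size
      · have h2 : ((acc ++ [i]).length : Int) = block_size := by
          simp only [List.length_append, List.length_cons, List.length_nil]
          push_cast; omega
        rw [if_pos hdone, if_pos h2]
        have hcond : 1 ≤ block_size ∧ (((acc ++ [i]).length : Int) = block_size) := by
          refine ⟨?_, h2⟩
          have : (0:Int) ≤ (acc.length : Int) := by positivity
          omega
        rw [if_pos hcond, FS_gaps_append]
      · have h2 : ¬ (((acc ++ [i]).length : Int) = block_size) := by
          simp only [List.length_append, List.length_cons, List.length_nil]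
          push_cast; omega
        rw [if_neg hdone, if_neg h2]
        have := ih (i + 1) (acc ++ [i]) (Or.inr h2)
        rw [FS_lastD_append] at this
        have harith : i + 1 - i - 1 = (0 : Int) := by ring
        rw [harith, FS_gaps_append] at this
        simp only [List.length_append, List.length_cons, List.length_nil, Nat.cast_add,
          Nat.cast_one] at this ⊢
        simpa [FS_lastD] using this

-- ===== VERDICT (by name: the statement is the Claim_ definition above) =====
theorem FS_decoder_spec : Claim_equal_FS_decoder := by
  intro seq block_size _
  unfold Spec_FS_decoder FS_decoder FS_decoder_alt
  have := FS_main seq 0 [] block_size (Or.inl rfl)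
  simpa [FS_gaps, FS_lastD] using this
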